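-- pv_equiv track=rewrite | github.com/MaxineSun/Procedural-Knowledge-Graph | utils/functional.py | find_min_continuous_length
-- ===== SOURCE A (Python) =====
-- def find_min_continuous_length(nums):
--     if not nums:
--         return 0
--     min_length = float('inf')
--     current_length = 1
--     for i in range(1, len(nums)):
--         if nums[i] == nums[i - 1]:
--             current_length += 1
--         else:
--             min_length = min(min_length, current_length)
--             current_length = 1
--     min_length = min(min_length, current_length)
--     return min_length
-- ===== SOURCE B (Python) =====
-- def find_min_continuous_length(nums):
--     if not nums:
--         return 0
--     n = len(nums)
--     cuts = [0] + [i for i in range(1, n) if nums[i] != nums[i - 1]] + [n]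
--     return min(b - a for a, b in zip(cuts, cuts[1:]))
-- ===== Notes on version B (the rewrite author's own statement) =====
-- stated objective: alternative
-- what changed: B computes the list of boundary indices where the value changes (plus 0 and n) and returns the minimum of consecutive boundary differences, instead of A's running-min/current-run-length state machine with a trailing fixup.
import Mathlib
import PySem

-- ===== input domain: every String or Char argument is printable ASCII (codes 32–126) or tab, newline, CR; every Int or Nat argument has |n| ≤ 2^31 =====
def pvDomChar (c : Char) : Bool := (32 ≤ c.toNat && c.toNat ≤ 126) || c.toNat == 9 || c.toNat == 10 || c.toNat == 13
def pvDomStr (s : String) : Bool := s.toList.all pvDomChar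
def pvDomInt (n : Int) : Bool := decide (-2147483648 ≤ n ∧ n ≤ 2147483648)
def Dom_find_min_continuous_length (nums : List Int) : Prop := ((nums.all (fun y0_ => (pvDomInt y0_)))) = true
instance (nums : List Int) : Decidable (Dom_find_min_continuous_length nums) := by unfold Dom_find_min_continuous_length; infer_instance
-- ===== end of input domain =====

-- B computes the boundary indices where the value changes and returns the minimum of consecutive boundary differences (alternative decomposition; same cost).


-- ===== PORT A =====
-- loop body of A's for-loop (state = (min_length as Option Int with none = inf, current_length))
def pvStepA (nums : List Int) (st : Option Int × Int) (i : Int) : Option Int × Int :=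
  if PySem.List.pyGetD nums i 0 = PySem.List.pyGetD nums (i - 1) 0 then
    (st.1, st.2 + 1)
  else
    (some (match st.1 with | none => st.2 | some m => min m st.2), 1)

def find_min_continuous_length (nums : List Int) : Int :=
  if nums = [] then 0
  else
    let st := (PySem.List.pyRange 1 (PySem.List.len nums) 1).foldl (pvStepA nums) (none, 1)
    match st.1 with | none => st.2 | some m => min m st.2

-- ===== PORT B =====
-- cuts = [0] + [i for i in range(1, n) if nums[i] != nums[i-1]] + [n];
-- zip(cuts, cuts[1:]) ported as cuts.zip cuts.tail (exact: cuts[1:] of a list is its tail)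
def find_min_continuous_length_alt (nums : List Int) : Int :=
  if nums = [] then 0
  else
    let n := PySem.List.len nums
    let cuts := 0 :: ((PySem.List.pyRange 1 n 1).filter
        (fun i => decide (PySem.List.pyGetD nums i 0 ≠ PySem.List.pyGetD nums (i - 1) 0))) ++ [n]
    match (cuts.zip cuts.tail).map (fun p => p.2 - p.1) with
    | [] => 0   -- unreachable: cuts always has at least two elements (Python min would raise on [])
    | h :: t => t.foldl min h

-- ===== PRECONDITION & SPEC =====
def Spec_find_min_continuous_length (nums : List Int) (out : Int) : Prop := out = find_min_continuous_length_alt nums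
instance (nums : List Int) (out : Int) : Decidable (Spec_find_min_continuous_length nums out) := by unfold Spec_find_min_continuous_length; infer_instance

-- ===== CLAIM =====
def Claim_equal_find_min_continuous_length : Prop := ∀ (nums : List Int), Dom_find_min_continuous_length nums → Spec_find_min_continuous_length nums (find_min_continuous_length nums)

-- ===== LEMMAS AND PROOFS =====

-- run lengths as a common intermediate between the two programs
def pvExtract (st : Option Int × Int) : Int :=
  match st.1 with | none => st.2 | some m => min m st.2

def pvF (prev : Int) (st : Option Int × Int) : List Int → Option Int × Int
  | [] => st
  | x :: xs => if x = prev then pvF x (st.1, st.2 + 1) xs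
               else pvF x (some (pvExtract st), 1) xs

def pvRunsFrom (v : Int) (n : Int) : List Int → List (Int × Int)
  | [] => [(v, n)]
  | x :: xs => if x = v then pvRunsFrom v (n + 1) xs else (v, n) :: pvRunsFrom x 1 xs

-- B's boundary list, started after a pending run whose next index is pos
def pvCutsFrom (prev : Int) (pos : Int) : List Int → List Int
  | [] => []
  | x :: xs => if x = prev then pvCutsFrom x (pos + 1) xs else pos :: pvCutsFrom x (pos + 1) xs

def pvDiffs (l : List Int) : List Int := (l.zip l.tail).map (fun p => p.2 - p.1)

def pvMFold (ml : Option Int) (l : List Int) : Int :=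
  match l with
  | [] => 0
  | h :: t => match ml with | none => t.foldl min h | some m => min m (t.foldl min h)

theorem pvFoldlMinPull (t : List Int) : ∀ a b : Int, t.foldl min (min a b) = min a (t.foldl min b) := by
  induction t with
  | nil => intro a b; rfl
  | cons c t ih =>
    intro a b
    simp only [List.foldl_cons]
    rw [min_assoc, ih]

theorem pvRunsFrom_ne_nil (xs : List Int) : ∀ v n, pvRunsFrom v n xs ≠ [] := by
  induction xs with
  | nil => intro v n; simp [pvRunsFrom]
  | cons x xs ih =>
    intro v n
    simp only [pvRunsFrom]
    split
    · exact ih v (n + 1)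
    · simp

theorem pvALoop (xs : List Int) : ∀ (pre : List Int) (prev : Int) (st : Option Int × Int),
    (PySem.List.pyRange ((pre.length : Int) + 1) (PySem.List.len (pre ++ prev :: xs)) 1).foldl
      (pvStepA (pre ++ prev :: xs)) st = pvF prev st xs := by
  induction xs with
  | nil =>
    intro pre prev st
    have h : PySem.List.len (pre ++ prev :: ([] : List Int)) = (pre.length : Int) + 1 := by
      simp [PySem.List.len]
    rw [h, PySem.List.pyRange_one_eq_nil (by omega)]
    rfl
  | cons x xs ih =>
    intro pre prev st
    have hlen : PySem.List.len (pre ++ prev :: x :: xs) = (pre.length : Int) + 2 + (xs.length : Int) := by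
      simp [PySem.List.len]; ring
    have hlt : (pre.length : Int) + 1 < PySem.List.len (pre ++ prev :: x :: xs) := by
      rw [hlen]; omega
    rw [PySem.List.pyRange_one_cons hlt, List.foldl_cons]
    have hget1 : PySem.List.pyGetD (pre ++ prev :: x :: xs) ((pre.length : Int) + 1) 0 = x := by
      rw [PySem.List.pyGetD_eq_getElem _ 0 (by omega) (by simp only [List.length_append, List.length_cons]; push_cast; omega)]
      have ht : ((pre.length : Int) + 1).toNat = pre.length + 1 := by omega
      simp only [ht]
      rw [List.getElem_append_right (by omega)]
      simp
    have hget0 : PySem.List.pyGetD (pre ++ prev :: x :: xs) ((pre.length : Int) + 1 - 1) 0 = prev := by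
      have h1 : (pre.length : Int) + 1 - 1 = (pre.length : Int) := by ring
      rw [h1, PySem.List.pyGetD_eq_getElem _ 0 (by omega) (by simp only [List.length_append, List.length_cons]; push_cast; omega)]
      have ht : ((pre.length : Int)).toNat = pre.length := by omega
      simp only [ht]
      rw [List.getElem_append_right (by omega)]
      simp
    have hre : pre ++ prev :: x :: xs = (pre ++ [prev]) ++ x :: xs := by simp
    have hstart : (pre.length : Int) + 1 + 1 = ((pre ++ [prev]).length : Int) + 1 := by
      simp
    by_cases hx : x = prev
    · have hstep : pvStepA (pre ++ prev :: x :: xs) st ((pre.length : Int) + 1)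
          = (st.1, st.2 + 1) := by
        unfold pvStepA; rw [hget1, hget0, if_pos hx]
      rw [hstep, pvF, if_pos hx, hstart]
      conv_lhs => rw [hre]
      exact ih (pre ++ [prev]) x (st.1, st.2 + 1)
    · have hstep : pvStepA (pre ++ prev :: x :: xs) st ((pre.length : Int) + 1)
          = (some (pvExtract st), 1) := by
        unfold pvStepA; rw [hget1, hget0, if_neg hx]; rfl
      rw [hstep, pvF, if_neg hx, hstart]
      conv_lhs => rw [hre]
      exact ih (pre ++ [prev]) x (some (pvExtract st), 1)

-- B's filtered range equals the structural boundary recursion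
theorem pvCutsLoop (xs : List Int) : ∀ (pre : List Int) (prev : Int),
    (PySem.List.pyRange ((pre.length : Int) + 1) (PySem.List.len (pre ++ prev :: xs)) 1).filter
      (fun i => decide (PySem.List.pyGetD (pre ++ prev :: xs) i 0 ≠ PySem.List.pyGetD (pre ++ prev :: xs) (i - 1) 0))
    = pvCutsFrom prev ((pre.length : Int) + 1) xs := by
  induction xs with
  | nil =>
    intro pre prev
    have h : PySem.List.len (pre ++ prev :: ([] : List Int)) = (pre.length : Int) + 1 := by
      simp [PySem.List.len]
    rw [h, PySem.List.pyRange_one_eq_nil (by omega)]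
    rfl
  | cons x xs ih =>
    intro pre prev
    have hlen : PySem.List.len (pre ++ prev :: x :: xs) = (pre.length : Int) + 2 + (xs.length : Int) := by
      simp [PySem.List.len]; ring
    have hlt : (pre.length : Int) + 1 < PySem.List.len (pre ++ prev :: x :: xs) := by
      rw [hlen]; omega
    rw [PySem.List.pyRange_one_cons hlt, List.filter_cons]
    have hget1 : PySem.List.pyGetD (pre ++ prev :: x :: xs) ((pre.length : Int) + 1) 0 = x := by
      rw [PySem.List.pyGetD_eq_getElem _ 0 (by omega) (by simp only [List.length_append, List.length_cons]; push_cast; omega)]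
      have ht : ((pre.length : Int) + 1).toNat = pre.length + 1 := by omega
      simp only [ht]
      rw [List.getElem_append_right (by omega)]
      simp
    have hget0 : PySem.List.pyGetD (pre ++ prev :: x :: xs) ((pre.length : Int) + 1 - 1) 0 = prev := by
      have h1 : (pre.length : Int) + 1 - 1 = (pre.length : Int) := by ring
      rw [h1, PySem.List.pyGetD_eq_getElem _ 0 (by omega) (by simp only [List.length_append, List.length_cons]; push_cast; omega)]
      have ht : ((pre.length : Int)).toNat = pre.length := by omega
      simp only [ht]
      rw [List.getElem_append_right (by omega)]
      simp
    have hre : pre ++ prev :: x :: xs = (pre ++ [prev]) ++ x :: xs := by simp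
    have hstart : (pre.length : Int) + 1 + 1 = ((pre ++ [prev]).length : Int) + 1 := by
      simp
    by_cases hx : x = prev
    · have hp : (decide (PySem.List.pyGetD (pre ++ prev :: x :: xs) ((pre.length : Int) + 1) 0
              ≠ PySem.List.pyGetD (pre ++ prev :: x :: xs) ((pre.length : Int) + 1 - 1) 0)) = false := by
        rw [hget1, hget0]; simp [hx]
      simp only [hp, Bool.false_eq_true, if_false]
      rw [pvCutsFrom, if_pos hx, hstart]
      conv_lhs => rw [hre]
      exact ih (pre ++ [prev]) x
    · have hp : (decide (PySem.List.pyGetD (pre ++ prev :: x :: xs) ((pre.length : Int) + 1) 0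
              ≠ PySem.List.pyGetD (pre ++ prev :: x :: xs) ((pre.length : Int) + 1 - 1) 0)) = true := by
        rw [hget1, hget0]; simp [hx]
      simp only [hp, if_true]
      rw [pvCutsFrom, if_neg hx, hstart]
      congr 1
      conv_lhs => rw [hre]
      exact ih (pre ++ [prev]) x

theorem pvDiffs_cons (a b : Int) (t : List Int) : pvDiffs (a :: b :: t) = (b - a) :: pvDiffs (b :: t) := rfl

-- consecutive differences of the boundary list are exactly the run lengths
theorem pvDiffs_cuts (xs : List Int) : ∀ (prev pos cl : Int),
    pvDiffs ((pos - cl) :: pvCutsFrom prev pos xs ++ [pos + (xs.length : Int)])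
      = (pvRunsFrom prev cl xs).map Prod.snd := by
  induction xs with
  | nil =>
    intro prev pos cl
    simp only [pvCutsFrom, pvRunsFrom, List.length_nil, Int.natCast_zero, add_zero,
      List.map_cons, List.map_nil]
    show pvDiffs [pos - cl, pos] = [cl]
    simp [pvDiffs]
  | cons x xs ih =>
    intro prev pos cl
    by_cases hx : x = prev
    · rw [pvCutsFrom, if_pos hx, pvRunsFrom, if_pos hx]
      have h1 : pos - cl = (pos + 1) - (cl + 1) := by ring
      have h2 : pos + ((x :: xs).length : Int) = (pos + 1) + (xs.length : Int) := by
        simp; ring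
      rw [h1, h2, hx]
      exact ih prev (pos + 1) (cl + 1)
    · rw [pvCutsFrom, if_neg hx, pvRunsFrom, if_neg hx]
      simp only [List.cons_append, List.map_cons]
      rw [pvDiffs_cons]
      have h0 : pos - (pos - cl) = cl := by ring
      have h2 : pos + ((x :: xs).length : Int) = (pos + 1) + (xs.length : Int) := by
        simp; ring
      rw [h0, h2]
      congr 1
      have h := ih x (pos + 1) 1
      rw [show pos + 1 - 1 = pos from by ring] at h
      exact h

theorem pvKey (xs : List Int) : ∀ (prev : Int) (ml : Option Int) (cl : Int),
    pvExtract (pvF prev (ml, cl) xs) = pvMFold ml ((pvRunsFrom prev cl xs).map Prod.snd) := by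
  induction xs with
  | nil =>
    intro prev ml cl
    cases ml <;> rfl
  | cons x xs ih =>
    intro prev ml cl
    rw [pvF]
    by_cases hx : x = prev
    · subst hx
      rw [if_pos rfl, ih x ml (cl + 1), pvRunsFrom, if_pos rfl]
    · simp only [if_neg hx]
      rw [ih x (some (pvExtract (ml, cl))) 1]
      simp only [pvRunsFrom, if_neg hx, List.map_cons]
      obtain ⟨h, t, hht⟩ : ∃ h t, (pvRunsFrom x 1 xs).map Prod.snd = h :: t := by
        rcases hl : (pvRunsFrom x 1 xs).map Prod.snd with _ | ⟨h, t⟩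
        · exact absurd (List.map_eq_nil_iff.mp hl) (pvRunsFrom_ne_nil xs x 1)
        · exact ⟨h, t, rfl⟩
      rw [hht]
      cases ml with
      | none =>
        show min cl (t.foldl min h) = t.foldl min (min cl h)
        rw [pvFoldlMinPull]
      | some m =>
        show min (min m cl) (t.foldl min h) = min m (t.foldl min (min cl h))
        rw [pvFoldlMinPull, ← min_assoc]

-- ===== VERDICT =====
theorem find_min_continuous_length_spec : Claim_equal_find_min_continuous_length := by
  intro nums _
  unfold Spec_find_min_continuous_length
  cases nums with
  | nil => rfl
  | cons a rest =>
    show find_min_continuous_length (a :: rest) = find_min_continuous_length_alt (a :: rest)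
    have hA : find_min_continuous_length (a :: rest) = pvExtract (pvF a (none, 1) rest) := by
      unfold find_min_continuous_length
      rw [if_neg (by simp)]
      have h := pvALoop rest [] a (none, 1)
      simp only [List.nil_append, List.length_nil, Int.natCast_zero, zero_add] at h
      rw [h]
      rfl
    have hcuts : (PySem.List.pyRange 1 (PySem.List.len (a :: rest)) 1).filter
        (fun i => decide (PySem.List.pyGetD (a :: rest) i 0 ≠ PySem.List.pyGetD (a :: rest) (i - 1) 0))
        = pvCutsFrom a 1 rest := by
      have h := pvCutsLoop rest [] a
      simp only [List.nil_append, List.length_nil, Int.natCast_zero, zero_add] at h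
      exact h
    have hdiffs : pvDiffs (0 :: pvCutsFrom a 1 rest ++ [PySem.List.len (a :: rest)])
        = (pvRunsFrom a 1 rest).map Prod.snd := by
      have h0 : (0 : Int) = 1 - 1 := by ring
      have hn : PySem.List.len (a :: rest) = 1 + (rest.length : Int) := by
        simp [PySem.List.len]; ring
      rw [hn]
      conv_lhs => rw [h0]
      exact pvDiffs_cuts rest a 1 1
    have hB : find_min_continuous_length_alt (a :: rest)
        = pvMFold none ((pvRunsFrom a 1 rest).map Prod.snd) := by
      unfold find_min_continuous_length_alt
      rw [if_neg (by simp)]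
      simp only [hcuts]
      have : ((0 :: pvCutsFrom a 1 rest ++ [PySem.List.len (a :: rest)]).zip
          (0 :: pvCutsFrom a 1 rest ++ [PySem.List.len (a :: rest)]).tail).map (fun p => p.2 - p.1)
          = (pvRunsFrom a 1 rest).map Prod.snd := hdiffs
      rw [this]
      rcases hl : (pvRunsFrom a 1 rest).map Prod.snd with _ | ⟨h, t⟩
      · exact absurd (List.map_eq_nil_iff.mp hl) (pvRunsFrom_ne_nil rest a 1)
      · rfl
    rw [hA, hB, pvKey]
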